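-- pv_equiv track=rewrite | github.com/quinnzshen/practice | Khan Academy/khan.py | strcspn
-- ===== SOURCE A (Python) =====
-- def strcspn(input, delimiters):
--     """
--     duck-typing: If it looks like a duck, quacks like a duck...
--     then treat it like a duck!
--
--     >>> strcspn("monkeys", "rtk")
--     3
--     >>> strcspn("monkeys", "rtkm")
--     0
--     >>> strcspn("monkeys", "rt")
--     7
--     """
--
--     delims = set()   # delims = set(delimiters)
--     for char in delimiters:
--         delims.add(char)
--
--     counter = 0
--     for char in input:   # for char, idx in enumerate(input):
--         if char in delims:
--             return counter
--         counter += 1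
--     return counter
-- ===== SOURCE B (Python) =====
-- def strcspn(input, delimiters):
--     positions = [input.find(d) for d in delimiters if d in input]
--     return min(positions) if positions else len(input)
-- ===== Notes on version B (the rewrite author's own statement) =====
-- stated objective: idiomatic
-- what changed: Replaces the set-build plus character-by-character scan with a counter by a per-delimiter first-occurrence search (input.find) followed by a minimum, falling back to len(input) when no delimiter occurs.
import Mathlib
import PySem

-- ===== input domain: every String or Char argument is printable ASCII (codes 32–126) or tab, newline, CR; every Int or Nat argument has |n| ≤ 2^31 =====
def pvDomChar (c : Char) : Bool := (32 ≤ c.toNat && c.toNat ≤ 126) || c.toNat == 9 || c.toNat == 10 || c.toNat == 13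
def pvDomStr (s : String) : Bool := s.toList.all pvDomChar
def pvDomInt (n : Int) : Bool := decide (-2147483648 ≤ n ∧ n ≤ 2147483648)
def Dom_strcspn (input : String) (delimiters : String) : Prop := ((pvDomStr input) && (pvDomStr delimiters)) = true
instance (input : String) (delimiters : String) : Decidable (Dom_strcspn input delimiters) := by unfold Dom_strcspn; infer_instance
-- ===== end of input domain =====

-- B replaces A's set-build + char-by-char scan with a per-delimiter first-occurrence
-- search (find) followed by a minimum (idiomatic; no speed claim).


-- ===== PORT A =====
-- 'for char in input: if char in delims: return counter; counter += 1'
def strcspnLoop (delims : PySem.Set Char) : List Char → Int → Int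
  | [], counter => counter
  | ch :: rest, counter =>
      if PySem.Set.contains delims ch then counter else strcspnLoop delims rest (counter + 1)

def strcspn (input : String) (delimiters : String) : Int :=
  let delims : PySem.Set Char := delimiters.toList.foldl PySem.Set.add PySem.Set.empty
  strcspnLoop delims input.toList 0

-- ===== PORT B =====
-- positions = [input.find(d) for d in delimiters if d in input]; min(positions) if positions else len(input)
def strcspn_alt (input : String) (delimiters : String) : Int :=
  let positions : List Int :=
    (delimiters.toList.filter (fun d => PySem.Str.isIn (String.ofList [d]) input)).map
      (fun d => PySem.Str.find input (String.ofList [d]))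
  match PySem.List.min? positions (fun x => x) with
  | some m => m
  | none => PySem.Str.len input

-- ===== PRECONDITION & SPEC =====
def Spec_strcspn (input : String) (delimiters : String) (out : Int) : Prop := out = strcspn_alt input delimiters
instance (input : String) (delimiters : String) (out : Int) : Decidable (Spec_strcspn input delimiters out) := by unfold Spec_strcspn; infer_instance

-- ===== CLAIM (what is proved, stated in full; the proofs are below) =====
def Claim_equal_strcspn : Prop := ∀ (input : String) (delimiters : String), Dom_strcspn input delimiters → Spec_strcspn input delimiters (strcspn input delimiters)

-- ===== LEMMAS AND PROOFS =====

-- A's loop computes counter + (index of first delimiter char, or length).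
theorem strcspnLoop_eq (delims : PySem.Set Char) (l : List Char) (c : Int) :
    strcspnLoop delims l c
      = c + (l.findIdx (fun ch => PySem.Set.contains delims ch) : Int) := by
  induction l generalizing c with
  | nil => simp [strcspnLoop]
  | cons ch rest ih =>
      simp only [strcspnLoop, List.findIdx_cons]
      cases h : PySem.Set.contains delims ch
      · simp only [Bool.false_eq_true, if_false, cond_false, ih]
        push_cast
        ring
      · simp [h]

-- single-char prefix of a drop pins down the element
theorem singleton_prefix_drop {l : List Char} {d : Char} {k : Nat} (hk : k < l.length)
    (h : [d] <+: l.drop k) : l[k] = d := by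
  rcases h with ⟨t, ht⟩
  have h1 : l[k] :: l.drop (k + 1) = d :: t := by
    rw [List.getElem_cons_drop hk, ← ht]; rfl
  injection h1

-- find on a singleton equals the least index holding that char
theorem find_singleton_mem {l : List Char} {d : Char} (hd : d ∈ l) :
    0 ≤ PySem.Chars.find l [d] ∧ (PySem.Chars.find l [d]).toNat < l.length ∧
      l[(PySem.Chars.find l [d]).toNat]'(by
        have h0 : 0 ≤ PySem.Chars.find l [d] :=
          (PySem.Chars.find_nonneg_iff l [d]).mpr ((List.singleton_infix_iff d l).mpr hd)
        have := (PySem.Chars.find_spec h0).1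
        rcases this with ⟨t, ht⟩
        have hlen : (List.drop (PySem.Chars.find l [d]).toNat l).length ≠ 0 := by
          rw [← ht]; simp
        simp only [List.length_drop] at hlen
        omega) = d := by
  have h0 : 0 ≤ PySem.Chars.find l [d] :=
    (PySem.Chars.find_nonneg_iff l [d]).mpr ((List.singleton_infix_iff d l).mpr hd)
  obtain ⟨hpre, _⟩ := PySem.Chars.find_spec h0
  have hlt : (PySem.Chars.find l [d]).toNat < l.length := by
    rcases hpre with ⟨t, ht⟩
    have hlen : (List.drop (PySem.Chars.find l [d]).toNat l).length ≠ 0 := by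
      rw [← ht]; simp
    simp only [List.length_drop] at hlen; omega
  exact ⟨h0, hlt, singleton_prefix_drop hlt hpre⟩

-- the common characterisation: first index whose char is in delimiters, else length
theorem strcspn_alt_eq (input : String) (delimiters : String) :
    strcspn_alt input delimiters
      = (input.toList.findIdx (fun ch => delimiters.toList.contains ch) : Int) := by
  classical
  set l := input.toList with hl
  set dl := delimiters.toList with hdl
  set p : Char → Bool := fun ch => dl.contains ch with hp
  set kA := l.findIdx p with hkA
  have hmk : ∀ d : Char, (String.ofList [d]).toList = [d] := fun d => by simp
  -- membership test: 'd in input' ↔ d ∈ l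
  have hisIn : ∀ d : Char, PySem.Str.isIn (String.ofList [d]) input = true ↔ d ∈ l := by
    intro d
    rw [PySem.Str.isIn_iff_infix, hmk]
    exact List.singleton_infix_iff d l
  -- every produced position is ≥ kA, by minimality of findIdx
  have hlow : ∀ d ∈ dl, d ∈ l → (kA : Int) ≤ PySem.Chars.find l [d] := by
    intro d hddl hdl'
    obtain ⟨h0, hlt, hget⟩ := find_singleton_mem hdl'
    by_contra hcon
    rw [not_le] at hcon
    have hltk : (PySem.Chars.find l [d]).toNat < kA := by omega
    have := List.not_of_lt_findIdx hltk
    have hpd : p d = false := by rw [← hget]; exact this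
    simp only [hp, List.contains_eq_mem, decide_eq_false_iff_not] at hpd
    exact hpd hddl
  unfold strcspn_alt
  simp only [← hl, ← hdl]
  by_cases hex : kA < l.length
  · -- a delimiter occurs; d0 is the char at kA
    have hpd0 : p l[kA] = true := List.findIdx_getElem (w := hex)
    set d0 := l[kA] with hd0
    have hd0dl : d0 ∈ dl := by
      simpa [hp, List.contains_eq_mem] using hpd0
    have hd0l : d0 ∈ l := List.getElem_mem hex
    -- find l [d0] = kA
    have hfind_d0 : PySem.Chars.find l [d0] = (kA : Int) := by
      obtain ⟨h0, hlt, hget⟩ := find_singleton_mem hd0l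
      have hge : (kA : Int) ≤ PySem.Chars.find l [d0] := hlow d0 hd0dl hd0l
      have hle : PySem.Chars.find l [d0] ≤ (kA : Int) := by
        by_contra hcon
        rw [not_le] at hcon
        obtain ⟨_, hmin⟩ := PySem.Chars.find_spec h0
        have : ¬ [d0] <+: l.drop kA := hmin kA (by omega)
        apply this
        refine ⟨l.drop (kA + 1), ?_⟩
        rw [hd0]
        simpa using List.getElem_cons_drop hex
      omega
    -- kA is a member of positions
    have hmem : (kA : Int) ∈ (dl.filter (fun d => PySem.Str.isIn (String.ofList [d]) input)).map
        (fun d => PySem.Str.find input (String.ofList [d])) := by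
      refine List.mem_map.mpr ⟨d0, ?_, ?_⟩
      · exact List.mem_filter.mpr ⟨hd0dl, (hisIn d0).mpr hd0l⟩
      · rw [PySem.Str.find_eq, hmk, ← hl]; exact hfind_d0
    -- min? is some m with m = kA
    have hne : (dl.filter (fun d => PySem.Str.isIn (String.ofList [d]) input)).map
        (fun d => PySem.Str.find input (String.ofList [d])) ≠ [] := by
      intro h; rw [h] at hmem; exact List.not_mem_nil hmem
    obtain ⟨m, hm⟩ : ∃ m, PySem.List.min? ((dl.filter (fun d => PySem.Str.isIn (String.ofList [d]) input)).map
        (fun d => PySem.Str.find input (String.ofList [d]))) (fun x => x) = some m := by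
      cases hmin : PySem.List.min? ((dl.filter (fun d => PySem.Str.isIn (String.ofList [d]) input)).map
        (fun d => PySem.Str.find input (String.ofList [d]))) (fun x => x) with
      | none => exact absurd ((PySem.List.min?_eq_none_iff _ _).mp hmin) hne
      | some m => exact ⟨m, rfl⟩
    rw [hm]
    have hmle : m ≤ (kA : Int) := PySem.List.min?_isMin hm _ hmem
    have hmge : (kA : Int) ≤ m := by
      have hmmem : m ∈ (dl.filter (fun d => PySem.Str.isIn (String.ofList [d]) input)).map
        (fun d => PySem.Str.find input (String.ofList [d])) := PySem.List.min?_mem hm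
      obtain ⟨d, hdmem, hdeq⟩ := List.mem_map.mp hmmem
      obtain ⟨hddl, hdin⟩ := List.mem_filter.mp hdmem
      have hdinl : d ∈ l := (hisIn d).mp hdin
      rw [← hdeq, PySem.Str.find_eq, hmk, ← hl]
      exact hlow d hddl hdinl
    show m = (kA : Int)
    omega
  · -- no delimiter occurs: positions is empty, result is len(input)
    have hkAeq : kA = l.length := by
      have := List.findIdx_le_length (p := p) (xs := l)
      omega
    have hnone : ∀ x ∈ l, p x = false := List.findIdx_eq_length.mp hkAeq
    have hfilter : dl.filter (fun d => PySem.Str.isIn (String.ofList [d]) input) = [] := by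
      rw [List.filter_eq_nil_iff]
      intro d hddl
      intro hin
      have hdl' : d ∈ l := (hisIn d).mp hin
      have := hnone d hdl'
      simp only [hp, List.contains_eq_mem, decide_eq_false_iff_not] at this
      exact this hddl
    rw [hfilter]
    simp only [List.map_nil]
    rw [show PySem.List.min? ([] : List Int) (fun x => x) = none from rfl]
    rw [hkAeq, PySem.Str.len_eq, hl]

-- ===== VERDICT (by name: the statement is the Claim_ definition above) =====
theorem strcspn_spec : Claim_equal_strcspn := by
  intro input delimiters _
  unfold Spec_strcspn
  rw [strcspn_alt_eq]
  show strcspnLoop (PySem.Set.ofList delimiters.toList) input.toList 0 = _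
  rw [strcspnLoop_eq, zero_add]
  congr 2
  funext ch
  simp [PySem.Set.contains, PySem.Set.mem_ofList, List.contains_eq_mem]
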